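-- pv_equiv track=rewrite | github.com/Ash-bytes11/Porfolio_Projects | Porfolio_Projects/Family_Tree/family_tree.py | get_removed_count
-- ===== SOURCE A (Python) =====
-- def get_removed_count(person_name, ancestor_name, people_dict, count=0):
--     # Check if person_name is the ancestor_name
--     if person_name == ancestor_name:
--         return count
--
--     # Get the parents of person_name
--     person_parents = people_dict.get(person_name, [])
--
--     # Iterate over the parents and increment the count
--     for parent in person_parents:
--         count += 1
--         # Recursively call get_removed_count with parent and ancestor_name
--         return get_removed_count(parent, ancestor_name, people_dict, count)
--
--     return None
-- ===== SOURCE B (Python) =====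
-- def get_removed_count(person_name, ancestor_name, people_dict, count=0):
--     # Precompute the first-parent successor map once, then walk it iteratively.
--     step = {k: ps[0] for k, ps in people_dict.items() if ps}
--     while person_name != ancestor_name:
--         if person_name not in step:
--             return None
--         person_name = step[person_name]
--         count += 1
--     return count
-- ===== Notes on version B (the rewrite author's own statement) =====
-- stated objective: simpler
-- what changed: Replaces the recursive chain-walk (with its odd for-loop-that-returns) by a first-parent successor dict built once plus a plain iterative while-loop.
import Mathlib
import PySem

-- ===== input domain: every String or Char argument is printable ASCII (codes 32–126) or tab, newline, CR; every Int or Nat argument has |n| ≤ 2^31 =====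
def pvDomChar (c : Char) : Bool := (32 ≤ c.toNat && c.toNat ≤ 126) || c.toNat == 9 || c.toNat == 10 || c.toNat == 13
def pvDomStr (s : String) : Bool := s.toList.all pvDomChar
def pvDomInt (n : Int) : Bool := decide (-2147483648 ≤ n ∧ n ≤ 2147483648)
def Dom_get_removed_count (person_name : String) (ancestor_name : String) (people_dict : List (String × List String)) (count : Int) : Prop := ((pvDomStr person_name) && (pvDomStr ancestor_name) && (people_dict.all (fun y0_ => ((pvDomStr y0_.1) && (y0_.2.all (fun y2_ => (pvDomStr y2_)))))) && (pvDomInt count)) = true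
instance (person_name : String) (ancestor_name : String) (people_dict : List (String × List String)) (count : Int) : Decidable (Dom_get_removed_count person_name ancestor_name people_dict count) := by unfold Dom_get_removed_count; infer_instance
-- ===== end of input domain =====

-- B replaces A's recursive first-parent chain-walk by a successor map built once plus an iterative loop (same cost, plainer).


-- ===== PORT A =====
-- A's unbounded recursion is made total with a fuel guard; on Pre_ inputs the chain
-- visits distinct keys, so fuel = people_dict.length + 1 never runs out.
def get_removed_count_go (ancestor_name : String) (people_dict : List (String × List String)) : Nat → String → Int → Option Int
  | 0, _, _ => none
  | fuel + 1, person_name, count =>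
    -- if person_name == ancestor_name: return count
    if person_name == ancestor_name then some count
    else
      -- person_parents = people_dict.get(person_name, [])
      match (PySem.Dict.mk people_dict).getD person_name [] with
      -- for parent in person_parents: count += 1; return recursive call
      | parent :: _ => get_removed_count_go ancestor_name people_dict fuel parent (count + 1)
      -- loop body never ran: return None
      | [] => none

def get_removed_count (person_name : String) (ancestor_name : String) (people_dict : List (String × List String)) (count : Int) : Option Int :=
  get_removed_count_go ancestor_name people_dict (people_dict.length + 1) person_name count

-- ===== PORT B =====
-- step = {k: ps[0] for k, ps in people_dict.items() if ps}
def grc_step (people_dict : List (String × List String)) : PySem.Dict String String :=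
  people_dict.foldl (fun acc kv => match kv.2 with | [] => acc | p :: _ => acc.insert kv.1 p) PySem.Dict.empty

-- while person_name != ancestor_name: …  (fuel guard for totality, as in port A)
def grc_loop (ancestor_name : String) (step : PySem.Dict String String) : Nat → String → Int → Option Int
  | 0, _, _ => none
  | fuel + 1, person_name, count =>
    if person_name == ancestor_name then some count
    else
      match step.get? person_name with
      | none => none                                        -- if person_name not in step: return None
      | some p => grc_loop ancestor_name step fuel p (count + 1)  -- person_name = step[person_name]; count += 1

def get_removed_count_alt (person_name : String) (ancestor_name : String) (people_dict : List (String × List String)) (count : Int) : Option Int :=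
  grc_loop ancestor_name (grc_step people_dict) (people_dict.length + 1) person_name count

-- ===== PRECONDITION & SPEC =====
-- the first-parent successor of a name (none = no/empty parent entry), stopping at the ancestor
def grc_next (ancestor_name : String) (people_dict : List (String × List String)) (s : Option String) : Option String :=
  s.bind (fun t => if t = ancestor_name then none else ((PySem.Dict.mk people_dict).getD t []).head?)

-- Pre_ excludes (a) assoc lists with duplicate keys, which cannot arise from a Python dict, and
-- (b) inputs whose first-parent chain never reaches the ancestor or a parentless name (it cycles),
-- on which Python A raises RecursionError; an acyclic chain exhausts within length+2 steps.
def Pre_get_removed_count (person_name : String) (ancestor_name : String) (people_dict : List (String × List String)) (count : Int) : Prop :=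
  (people_dict.map Prod.fst).Nodup ∧
  (grc_next ancestor_name people_dict)^[people_dict.length + 2] (some person_name) = none
instance (person_name : String) (ancestor_name : String) (people_dict : List (String × List String)) (count : Int) : Decidable (Pre_get_removed_count person_name ancestor_name people_dict count) := by unfold Pre_get_removed_count; infer_instance

def pvWitness_get_removed_count : String × String × (List (String × List String)) × Int :=
  ("a", "c", [("a", ["b"]), ("b", ["c"])], 0)

def Spec_get_removed_count (person_name : String) (ancestor_name : String) (people_dict : List (String × List String)) (count : Int) (out : Option Int) : Prop := out = get_removed_count_alt person_name ancestor_name people_dict count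
instance (person_name : String) (ancestor_name : String) (people_dict : List (String × List String)) (count : Int) (out : Option Int) : Decidable (Spec_get_removed_count person_name ancestor_name people_dict count out) := by unfold Spec_get_removed_count; infer_instance

-- ===== CLAIM (what is proved, stated in full; the proofs are below) =====
def Claim_equal_get_removed_count : Prop := ∀ (person_name : String) (ancestor_name : String) (people_dict : List (String × List String)) (count : Int), Dom_get_removed_count person_name ancestor_name people_dict count → Pre_get_removed_count person_name ancestor_name people_dict count → Spec_get_removed_count person_name ancestor_name people_dict count (get_removed_count person_name ancestor_name people_dict count)

-- ===== LEMMAS AND PROOFS =====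

-- a key not in the remaining entries is unchanged by the rest of the fold
theorem grc_step_get?_not_mem (d : List (String × List String)) (acc : PySem.Dict String String) (k : String)
    (h : k ∉ d.map Prod.fst) :
    (d.foldl (fun acc kv => match kv.2 with | [] => acc | p :: _ => acc.insert kv.1 p) acc).get? k = acc.get? k := by
  induction d generalizing acc with
  | nil => rfl
  | cons hd tl ih =>
    simp only [List.map_cons, List.mem_cons, not_or] at h
    simp only [List.foldl_cons]
    rw [ih _ h.2]
    cases hps : hd.2 with
    | nil => rfl
    | cons p ps => exact PySem.Dict.get?_insert_of_ne _ _ h.1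

-- under distinct keys, the successor map's lookup is the head of A's parent lookup
theorem grc_step_get?_eq (d : List (String × List String)) (acc : PySem.Dict String String) (k : String)
    (hnd : (d.map Prod.fst).Nodup) (hacc : acc.get? k = none) :
    (d.foldl (fun acc kv => match kv.2 with | [] => acc | p :: _ => acc.insert kv.1 p) acc).get? k
      = ((PySem.Dict.mk d).getD k []).head? := by
  induction d generalizing acc with
  | nil => simpa [PySem.Dict.getD, PySem.Dict.get?] using hacc
  | cons hd tl ih =>
    obtain ⟨k0, ps0⟩ := hd
    simp only [List.map_cons, List.nodup_cons] at hnd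
    simp only [List.foldl_cons]
    by_cases hk : k0 = k
    · subst hk
      rw [grc_step_get?_not_mem _ _ _ hnd.1]
      have hr : (PySem.Dict.mk ((k0, ps0) :: tl)).getD k0 [] = ps0 := by
        simp [PySem.Dict.getD_eq_get?_getD, PySem.Dict.get?_mk_cons]
      rw [hr]
      cases ps0 with
      | nil => simpa using hacc
      | cons p ps => simp [PySem.Dict.get?_insert_self]
    · have hacc' : (match ps0 with | [] => acc | p :: _ => acc.insert k0 p).get? k = none := by
        cases ps0 with
        | nil => exact hacc
        | cons p ps => rw [PySem.Dict.get?_insert_of_ne _ _ (Ne.symm hk)]; exact hacc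
      rw [ih _ hnd.2 hacc']
      have hb : (k0 == k) = false := by exact beq_eq_false_iff_ne.mpr hk
      simp [PySem.Dict.getD_eq_get?_getD, PySem.Dict.get?_mk_cons, hb]

theorem grc_loop_eq (ancestor_name : String) (d : List (String × List String))
    (hnd : (d.map Prod.fst).Nodup) :
    ∀ (fuel : Nat) (s : String) (c : Int),
      get_removed_count_go ancestor_name d fuel s c = grc_loop ancestor_name (grc_step d) fuel s c := by
  intro fuel
  induction fuel with
  | zero => intro s c; rfl
  | succ n ih =>
    intro s c
    simp only [get_removed_count_go, grc_loop]
    have hstep : (grc_step d).get? s = ((PySem.Dict.mk d).getD s []).head? :=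
      grc_step_get?_eq d PySem.Dict.empty s hnd (by simp [pysem])
    cases h : (PySem.Dict.mk d).getD s [] with
    | nil => rw [hstep, h]; rfl
    | cons p ps => rw [hstep, h]; simp only [List.head?]; rw [ih]

-- ===== VERDICT (by name: the statement is the Claim_ definition above) =====
theorem get_removed_count_spec : Claim_equal_get_removed_count := by
  intro person_name ancestor_name people_dict count _ hpre
  unfold Spec_get_removed_count get_removed_count get_removed_count_alt
  exact grc_loop_eq ancestor_name people_dict hpre.1 _ person_name count
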